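-- pv_equiv track=rewrite | github.com/artoonie/transcroobie | hit/transcriptProcessUtils.py | combineConsecutiveDuplicates
-- ===== SOURCE A (Python) =====
-- from itertools import groupby
--
-- def combineConsecutiveDuplicates(transcriptList, isCorrectList):
--     # Combine consecutive duplicates
--     combinedTranscript = []
--     combinedStatus = []
--     for group in groupby(zip(transcriptList, isCorrectList),
--             lambda f: f[1]): # lambda to sort by the bools in isCorrectList
--         combinedStatus.append(group[0])
--         combinedTranscript.append(" ".join([tuple[0] for tuple in group[1]]))
--     return combinedTranscript, combinedStatus
-- ===== SOURCE B (Python) =====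
-- def combineConsecutiveDuplicates(transcriptList, isCorrectList):
--     # Build the answer back-to-front: walk the zipped pairs in reverse, keeping
--     # the groups (newest last) as lists of words (newest word last); merge the
--     # word into the newest group when its status matches, else open a new one.
--     # A final double reversal restores the forward order. No grouping pass and
--     # no run buffer: the partial result itself is the accumulator.
--     revT, revS = [], []
--     for word, status in reversed(list(zip(transcriptList, isCorrectList))):
--         if revS and revS[-1] == status:
--             revT[-1].append(word)
--         else:
--             revT.append([word])
--             revS.append(status)
--     return [" ".join(g[::-1]) for g in revT[::-1]], revS[::-1]
-- ===== Notes on version B (the rewrite author's own statement) =====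
-- stated objective: alternative
-- what changed: Instead of grouping consecutive equal-status runs with itertools.groupby and joining each group, B builds the answer back-to-front: it walks the zipped pairs in reverse, merging each word into the newest group of the partial result (or opening a new group) and reverses at the end, so the result itself is the accumulator and no grouping iterator or run buffer exists.
import Mathlib
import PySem

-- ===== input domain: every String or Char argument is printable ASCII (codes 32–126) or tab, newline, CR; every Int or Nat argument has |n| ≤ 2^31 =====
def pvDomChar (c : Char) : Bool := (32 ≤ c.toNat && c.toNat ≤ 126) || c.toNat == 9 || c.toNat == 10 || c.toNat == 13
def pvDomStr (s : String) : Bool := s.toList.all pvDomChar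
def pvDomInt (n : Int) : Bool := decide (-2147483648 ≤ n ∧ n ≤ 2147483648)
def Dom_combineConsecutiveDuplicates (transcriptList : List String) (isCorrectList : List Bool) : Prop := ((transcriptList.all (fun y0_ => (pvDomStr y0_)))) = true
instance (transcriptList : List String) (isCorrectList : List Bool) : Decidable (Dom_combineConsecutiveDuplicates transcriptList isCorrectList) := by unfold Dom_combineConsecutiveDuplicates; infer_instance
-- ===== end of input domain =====

-- B builds the answer back-to-front (reversed walk merging each word into the newest group
-- of the partial result, double reversal at the end) instead of grouping runs with
-- itertools.groupby; same cost (objective: alternative).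

-- ===== PORT A =====
-- itertools.groupby over the zipped pairs, keyed by the bool: successive runs of equal status.
def pyGroupByStatus : List (String × Bool) → List (Bool × List String)
  | [] => []
  | (w, b) :: rest =>
      (b, w :: (rest.takeWhile (fun p => p.2 == b)).map Prod.fst) ::
        pyGroupByStatus (rest.dropWhile (fun p => p.2 == b))
termination_by l => l.length
decreasing_by
  simpa using Nat.lt_succ_of_le (List.length_dropWhile_le _ _)

def combineConsecutiveDuplicates (transcriptList : List String) (isCorrectList : List Bool) : List String × List Bool :=
  -- the for-loop over groupby, appending the key and the " ".join of the group's words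
  (pyGroupByStatus (transcriptList.zip isCorrectList)).foldl
    (fun acc g => (acc.1 ++ [PySem.Str.join " " g.2], acc.2 ++ [g.1])) ([], [])

-- ===== PORT B =====
-- one reversed-iteration step: revS[-1] is getLast?; revT[-1].append(word) is
-- dropLast ++ [last ++ [word]]; else append a new singleton group at the tail
def altStepE (acc : List (List String) × List Bool) (p : String × Bool) : List (List String) × List Bool :=
  match acc.2.getLast? with
  | some s =>
      if s == p.2 then (acc.1.dropLast ++ [(acc.1.getLastD []) ++ [p.1]], acc.2)
      else (acc.1 ++ [[p.1]], acc.2 ++ [p.2])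
  | none => (acc.1 ++ [[p.1]], acc.2 ++ [p.2])

def combineConsecutiveDuplicates_alt (transcriptList : List String) (isCorrectList : List Bool) : List String × List Bool :=
  -- for word, status in reversed(list(zip(...))): …   then the final double reversal
  let st := ((transcriptList.zip isCorrectList).reverse).foldl altStepE ([], [])
  ((st.1.reverse).map (fun g => PySem.Str.join " " g.reverse), st.2.reverse)

-- ===== PRECONDITION & SPEC =====
def Spec_combineConsecutiveDuplicates (transcriptList : List String) (isCorrectList : List Bool) (out : List String × List Bool) : Prop := out = combineConsecutiveDuplicates_alt transcriptList isCorrectList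
instance (transcriptList : List String) (isCorrectList : List Bool) (out : List String × List Bool) : Decidable (Spec_combineConsecutiveDuplicates transcriptList isCorrectList out) := by unfold Spec_combineConsecutiveDuplicates; infer_instance

-- ===== CLAIM (what is proved, stated in full; the proofs are below) =====
def Claim_equal_combineConsecutiveDuplicates : Prop := ∀ (transcriptList : List String) (isCorrectList : List Bool), Dom_combineConsecutiveDuplicates transcriptList isCorrectList → Spec_combineConsecutiveDuplicates transcriptList isCorrectList (combineConsecutiveDuplicates transcriptList isCorrectList)

-- ===== LEMMAS AND PROOFS =====

theorem str_ext (s t : String) (h : s.toList = t.toList) : s = t := by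
  have := congrArg String.ofList h
  simpa using this

theorem strJoin_singleton (w : String) : PySem.Str.join " " [w] = w := by
  apply str_ext
  simp [PySem.Str.join, PySem.Chars.join, List.intercalate]

theorem strJoin_cons (w : String) (ws : List String) (h : ws ≠ []) :
    PySem.Str.join " " (w :: ws) = w ++ " " ++ PySem.Str.join " " ws := by
  cases ws with
  | nil => exact absurd rfl h
  | cons b bs =>
    apply str_ext
    simp [PySem.Str.join, PySem.Chars.join, List.intercalate]

-- proof-side abstract version of B's step: same decision, cons at the head of the
-- already-decoded (joined, forward-order) result
def altStep (p : String × Bool) (acc : List String × List Bool) : List String × List Bool :=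
  match acc with
  | (t :: ts, s :: ss) =>
      if s == p.2 then ((p.1 ++ " " ++ t) :: ts, s :: ss)
      else (p.1 :: t :: ts, p.2 :: s :: ss)
  | (ts, ss) => (p.1 :: ts, p.2 :: ss)

def decodeSt (st : List (List String) × List Bool) : List String × List Bool :=
  ((st.1.reverse).map (fun g => PySem.Str.join " " g.reverse), st.2.reverse)

def InvSt (st : List (List String) × List Bool) : Prop :=
  st.1.length = st.2.length ∧ ∀ g ∈ st.1, g ≠ []

theorem altStepE_decode (st : List (List String) × List Bool) (p : String × Bool)
    (hinv : InvSt st) :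
    decodeSt (altStepE st p) = altStep p (decodeSt st) ∧ InvSt (altStepE st p) := by
  obtain ⟨T, S⟩ := st
  obtain ⟨hlen, hne⟩ := hinv
  rcases List.eq_nil_or_concat S with hS | ⟨S', s, rfl⟩
  · subst hS
    have hT : T = [] := List.length_eq_zero_iff.mp (by simpa using hlen)
    subst hT
    refine ⟨?_, ?_⟩
    · simp [altStepE, decodeSt, altStep, strJoin_singleton]
    · constructor <;> simp [altStepE]
  · rcases List.eq_nil_or_concat T with hT | ⟨T', g, rfl⟩
    · exfalso; subst hT; simp at hlen
    · by_cases hsp : s = p.2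
      · subst hsp
        refine ⟨?_, ?_⟩
        · have hg : g ≠ [] := hne g (by simp)
          simp only [altStepE, decodeSt, altStep, List.concat_eq_append,
            List.getLast?_concat, beq_self_eq_true, if_true, List.dropLast_concat,
            List.getLastD_concat, List.reverse_append, List.reverse_cons,
            List.reverse_nil, List.nil_append, List.cons_append, List.map_cons]
          rw [strJoin_cons p.1 g.reverse (by simpa using hg)]
        · refine ⟨?_, ?_⟩
          · simp only [altStepE, List.concat_eq_append, List.getLast?_concat,
              beq_self_eq_true, if_true, List.dropLast_concat, List.getLastD_concat]
            simp at hlen ⊢; omega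
          · intro g' hg'
            simp only [altStepE, List.concat_eq_append, List.getLast?_concat,
              beq_self_eq_true, if_true, List.dropLast_concat, List.getLastD_concat] at hg'
            rcases List.mem_append.mp hg' with h | h
            · exact hne g' (by simp [h])
            · simp at h; subst h; simp
      · have hbeq : (s == p.2) = false := by simp [hsp]
        refine ⟨?_, ?_⟩
        · simp [altStepE, decodeSt, altStep, hbeq, strJoin_singleton]
        · refine ⟨?_, ?_⟩
          · simp only [altStepE, List.concat_eq_append, List.getLast?_concat, hbeq]
            simp at hlen ⊢; omega
          · intro g' hg'
            simp only [altStepE, List.concat_eq_append, List.getLast?_concat, hbeq] at hg'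
            rcases List.mem_append.mp hg' with h | h
            · exact hne g' (by simpa using h)
            · simp at h; subst h; simp

theorem loop_decode (l : List (String × Bool)) :
    InvSt (l.reverse.foldl altStepE ([], [])) ∧
      decodeSt (l.reverse.foldl altStepE ([], [])) = l.foldr altStep ([], []) := by
  induction l with
  | nil => exact ⟨⟨rfl, by simp⟩, rfl⟩
  | cons p rest ih =>
    obtain ⟨hinv, hdec⟩ := ih
    have hfold : (p :: rest).reverse.foldl altStepE ([], []) =
        altStepE (rest.reverse.foldl altStepE ([], [])) p := by
      simp [List.foldl_append]
    obtain ⟨hcomm, hinv'⟩ := altStepE_decode (rest.reverse.foldl altStepE ([], [])) p hinv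
    refine ⟨by rw [hfold]; exact hinv', ?_⟩
    rw [hfold, hcomm, hdec]
    simp

-- A's append-fold over the group list is just the pair of maps
theorem foldl_groups (gs : List (Bool × List String)) (a : List String) (b : List Bool) :
    gs.foldl (fun acc g => (acc.1 ++ [PySem.Str.join " " g.2], acc.2 ++ [g.1])) (a, b) =
      (a ++ gs.map (fun g => PySem.Str.join " " g.2), b ++ gs.map Prod.fst) := by
  induction gs generalizing a b with
  | nil => simp
  | cons g gs ih => simp [ih]

-- the cons-form pass computes exactly the per-group joins and keys of A's grouping
theorem foldr_eq_groups (l : List (String × Bool)) :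
    l.foldr altStep ([], []) =
      ((pyGroupByStatus l).map (fun g => PySem.Str.join " " g.2),
       (pyGroupByStatus l).map Prod.fst) := by
  induction l with
  | nil => rw [pyGroupByStatus.eq_def]; simp
  | cons p rest ih =>
    obtain ⟨w, b⟩ := p
    rw [List.foldr_cons, ih]
    cases rest with
    | nil =>
      rw [pyGroupByStatus.eq_def]
      simp [pyGroupByStatus, altStep, strJoin_singleton]
    | cons q rest2 =>
      obtain ⟨w2, b2⟩ := q
      by_cases hb : b2 = b
      · subst hb
        rw [pyGroupByStatus.eq_def ((w, b2) :: (w2, b2) :: rest2)]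
        simp only [List.takeWhile_cons, List.dropWhile_cons, beq_self_eq_true, if_true,
          List.map_cons, altStep]
        rw [strJoin_cons w (w2 :: ((rest2.takeWhile (fun p => p.2 == b2)).map Prod.fst)) (by simp)]
        rw [pyGroupByStatus.eq_def ((w2, b2) :: rest2)]
        simp
      · rw [pyGroupByStatus.eq_def ((w, b) :: (w2, b2) :: rest2)]
        have hbne : (b2 == b) = false := by simp [hb]
        simp only [List.takeWhile_cons, List.dropWhile_cons, hbne]
        simp [altStep, strJoin_singleton]
        rw [pyGroupByStatus.eq_def ((w2, b2) :: rest2)]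
        simp
        exact hb

-- ===== VERDICT (by name: the statement is the Claim_ definition above) =====
theorem combineConsecutiveDuplicates_spec : Claim_equal_combineConsecutiveDuplicates := by
  intro tl il _
  unfold Spec_combineConsecutiveDuplicates combineConsecutiveDuplicates combineConsecutiveDuplicates_alt
  rw [foldl_groups]
  have h := (loop_decode (tl.zip il)).2
  unfold decodeSt at h
  rw [h, foldr_eq_groups]
  simp
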